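-- pv_equiv track=rewrite | github.com/otso-dev/programming-language | Python/python_apply/Day_04/Day04_str_op.py | replace_inblock
-- ===== SOURCE A (Python) =====
-- def replace_inblock(s):
--     start = False
--     s_list=list(s)
--     for i, c in enumerate(s_list):
--         if start==False and c=='"':
--             start = True
--         elif start == True and c==',':
--             s_list[i]='+'
--         elif start == True and c=='"':
--             start = False
--     return ''.join(s_list)
-- ===== SOURCE B (Python) =====
-- def replace_inblock(s):
--     parts = s.split('"')
--     return '"'.join(p.replace(',', '+') if i % 2 else p for i, p in enumerate(parts))
-- ===== Notes on version B (the rewrite author's own statement) =====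
-- stated objective: faster
-- what changed: Replaces the per-character quote-state machine with splitting on the double-quote character, replacing commas in the odd-indexed (inside-quotes) segments, and joining the segments back.
import Mathlib
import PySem

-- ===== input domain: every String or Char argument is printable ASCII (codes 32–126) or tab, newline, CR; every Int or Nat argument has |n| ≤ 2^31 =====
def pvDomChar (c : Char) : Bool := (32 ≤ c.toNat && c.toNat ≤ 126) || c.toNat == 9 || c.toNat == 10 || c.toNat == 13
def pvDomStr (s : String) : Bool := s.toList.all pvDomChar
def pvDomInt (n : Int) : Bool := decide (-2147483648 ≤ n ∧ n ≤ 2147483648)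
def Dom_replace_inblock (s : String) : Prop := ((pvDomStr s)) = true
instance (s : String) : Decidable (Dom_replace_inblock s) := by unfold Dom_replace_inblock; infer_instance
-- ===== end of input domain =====

-- B replaces A's per-character quote-state machine with split on the quote character / replace commas in odd segments / join (bulk string ops; measured faster by a constant factor).

-- ===== PORT A =====
-- the loop body, branches in A's order; state = (start, output chars so far)
def pvStepA (st : Bool × List Char) (c : Char) : Bool × List Char :=
  if st.1 = false ∧ c = '"' then (true, st.2 ++ [c])
  else if st.1 = true ∧ c = ',' then (st.1, st.2 ++ ['+'])
  else if st.1 = true ∧ c = '"' then (false, st.2 ++ [c])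
  else (st.1, st.2 ++ [c])

def replace_inblock (s : String) : String :=
  String.mk (s.toList.foldl pvStepA (false, [])).2

-- ===== PORT B =====
-- p.replace(',', '+') for the single characters ',' and '+'
def pvRepl (p : List Char) : List Char := p.map (fun c => if c = ',' then '+' else c)

def replace_inblock_alt (s : String) : String :=
  let parts := s.toList.splitOn '"'
  String.mk (List.intercalate ['"']
    ((parts.zipIdx).map (fun pi => if pi.2 % 2 = 1 then pvRepl pi.1 else pi.1)))

-- ===== PRECONDITION & SPEC =====
def Spec_replace_inblock (s : String) (out : String) : Prop := out = replace_inblock_alt s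
instance (s : String) (out : String) : Decidable (Spec_replace_inblock s out) := by unfold Spec_replace_inblock; infer_instance

-- ===== CLAIM (what is proved, stated in full; the proofs are below) =====
def Claim_equal_replace_inblock : Prop := ∀ (s : String), Dom_replace_inblock s → Spec_replace_inblock s (replace_inblock s)

-- ===== LEMMAS AND PROOFS =====

-- clean recursion equal to A's fold
def goA : Bool → List Char → List Char
  | _, [] => []
  | b, c :: rest =>
    if b = false ∧ c = '"' then c :: goA true rest
    else if b = true ∧ c = ',' then '+' :: goA b rest
    else if b = true ∧ c = '"' then c :: goA false rest
    else c :: goA b rest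

-- join-with-alternating-replace, fused
def jrep : Bool → List (List Char) → List Char
  | _, [] => []
  | b, [p] => if b then pvRepl p else p
  | b, p :: q :: ps => (if b then pvRepl p else p) ++ '"' :: jrep (!b) (q :: ps)

lemma foldl_stepA (cs : List Char) : ∀ (b : Bool) (acc : List Char),
    (cs.foldl pvStepA (b, acc)).2 = acc ++ goA b cs := by
  induction cs with
  | nil => intro b acc; simp [goA]
  | cons c rest ih =>
    intro b acc
    by_cases hb : b = true <;> by_cases hq : c = '"' <;> by_cases hc : c = ','
      <;> simp_all [pvStepA, goA]

lemma splitOn_ne_nil (cs : List Char) : cs.splitOn '"' ≠ [] := by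
  simp [List.splitOn]
  exact List.splitOnP_ne_nil _ _

lemma jrep_modifyHead (b : Bool) (c : Char) (l : List (List Char)) (h : l ≠ []) :
    jrep b (l.modifyHead (c :: ·)) =
      (if b = true ∧ c = ',' then '+' else c) :: jrep b l := by
  match l with
  | [p] => cases b <;> simp [jrep, pvRepl]
  | p :: q :: ps => cases b <;> simp [jrep, pvRepl]

lemma goA_eq_jrep (cs : List Char) : ∀ b, goA b cs = jrep b (cs.splitOn '"') := by
  induction cs with
  | nil => intro b; simp [goA, List.splitOn, List.splitOnP, List.splitOnP.go, jrep, pvRepl]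
  | cons c rest ih =>
    intro b
    by_cases hq : c = '"'
    · subst hq
      have hsplit : ('"' :: rest).splitOn '"' = [] :: rest.splitOn '"' := by
        simp [List.splitOn, List.splitOnP_cons]
      rw [hsplit]
      obtain ⟨p, ps, hps⟩ := List.exists_cons_of_ne_nil (splitOn_ne_nil rest)
      rw [hps]
      cases b <;> simp [goA, jrep, ih, hps, pvRepl]
    · have hsplit : (c :: rest).splitOn '"' = (rest.splitOn '"').modifyHead (c :: ·) := by
        simp [List.splitOn, List.splitOnP_cons, hq]
      rw [hsplit, jrep_modifyHead b c _ (splitOn_ne_nil rest)]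
      cases b <;> simp [goA, hq, ih] <;> split <;> simp_all

lemma intercalate2 (sep x y : List Char) (zs : List (List Char)) :
    List.intercalate sep (x :: y :: zs) = x ++ sep ++ List.intercalate sep (y :: zs) := by
  simp [List.intercalate, List.intersperse]

lemma intercalate_zipIdx (parts : List (List Char)) : ∀ (n : Nat),
    List.intercalate ['"']
      ((parts.zipIdx n).map (fun pi => if pi.2 % 2 = 1 then pvRepl pi.1 else pi.1)) =
      jrep (n % 2 = 1) parts := by
  induction parts with
  | nil => intro n; simp [jrep, List.intercalate]
  | cons p ps ih =>
    intro n
    match ps with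
    | [] => simp [jrep, List.intercalate]
    | q :: ps' =>
      have h := ih (n + 1)
      simp only [List.zipIdx_cons, List.map_cons] at h ⊢
      rw [intercalate2, h]
      by_cases hn : n % 2 = 1
      · have h1 : (n + 1) % 2 ≠ 1 := by omega
        simp [jrep, hn, h1]
      · have h1 : (n + 1) % 2 = 1 := by omega
        simp [jrep, hn, h1]

-- ===== VERDICT (by name: the statement is the Claim_ definition above) =====
theorem replace_inblock_spec : Claim_equal_replace_inblock := by
  intro s _
  show replace_inblock s = replace_inblock_alt s
  unfold replace_inblock replace_inblock_alt
  rw [foldl_stepA, List.nil_append, goA_eq_jrep]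
  exact congrArg String.mk (by simpa using (intercalate_zipIdx (s.toList.splitOn '"') 0).symm)
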